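-- pv_equiv track=rewrite | github.com/ALTA-DE4-Yovina-Silvia/4-data-structure-and-algorithm | part2-searching-and-shorting.py | max_items
-- ===== SOURCE A (Python) =====
-- def max_items(money, productPrice):
--     unique_prices = sorted(set(productPrice))
--
--     count = 0
--     for price in unique_prices:
--         if money >= price:
--             money -= price
--             count += 1
--         else:
--             break
--
--     return count
-- ===== SOURCE B (Python) =====
-- def max_items(money, productPrice):
--     # Prefix-sum decomposition: build cumulative costs of the sorted distinct
--     # prices, then count the affordable prefix (stops at first unaffordable sum).
--     prefix = []
--     total = 0
--     for p in sorted(set(productPrice)):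
--         total += p
--         prefix.append(total)
--     count = 0
--     while count < len(prefix) and prefix[count] <= money:
--         count += 1
--     return count
-- ===== Notes on version B (the rewrite author's own statement) =====
-- stated objective: alternative
-- what changed: B replaces A's destructive money-decrementing greedy loop with a two-phase prefix-sum formulation: it builds the cumulative costs of the sorted distinct prices and returns the length of the affordable prefix, never mutating money.
import Mathlib
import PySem

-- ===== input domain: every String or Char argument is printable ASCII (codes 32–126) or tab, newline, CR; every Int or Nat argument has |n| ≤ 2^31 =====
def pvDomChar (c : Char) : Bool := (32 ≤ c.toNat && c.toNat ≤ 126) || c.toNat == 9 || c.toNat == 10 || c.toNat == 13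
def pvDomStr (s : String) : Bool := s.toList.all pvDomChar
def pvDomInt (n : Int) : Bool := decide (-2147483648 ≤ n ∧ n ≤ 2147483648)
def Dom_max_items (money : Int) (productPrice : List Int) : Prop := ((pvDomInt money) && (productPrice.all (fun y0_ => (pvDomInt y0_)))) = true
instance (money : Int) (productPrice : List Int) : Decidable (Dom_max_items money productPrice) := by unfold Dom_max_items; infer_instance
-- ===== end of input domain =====

-- B replaces A's money-decrementing greedy break-loop with a prefix-sum construction
-- plus an affordable-prefix count (objective: alternative decomposition, same cost).


-- ===== PORT A =====
-- the 'for price in unique_prices' loop with its break: money and count are the loop state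
def maxItemsLoopA (money count : Int) : List Int → Int
  | [] => count
  | price :: rest =>
    if money ≥ price then maxItemsLoopA (money - price) (count + 1) rest
    else count

def max_items (money : Int) (productPrice : List Int) : Int :=
  let unique_prices := PySem.List.sorted (PySem.Set.ofList productPrice) (fun x => x) false
  maxItemsLoopA money 0 unique_prices

-- ===== PORT B =====
-- first phase: append the running total for each price (prefix list of cumulative costs)
def altPrefix (total : Int) : List Int → List Int
  | [] => []
  | p :: rest => (total + p) :: altPrefix (total + p) rest

-- second phase: the 'while count < len(prefix) and prefix[count] <= money' scan
def altCount (money : Int) : List Int → Int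
  | [] => 0
  | s :: rest => if s ≤ money then 1 + altCount money rest else 0

def max_items_alt (money : Int) (productPrice : List Int) : Int :=
  let pref := altPrefix 0 (PySem.List.sorted (PySem.Set.ofList productPrice) (fun x => x) false)
  altCount money pref

-- ===== PRECONDITION & SPEC =====
def Spec_max_items (money : Int) (productPrice : List Int) (out : Int) : Prop := out = max_items_alt money productPrice
instance (money : Int) (productPrice : List Int) (out : Int) : Decidable (Spec_max_items money productPrice out) := by unfold Spec_max_items; infer_instance

-- ===== CLAIM (what is proved, stated in full; the proofs are below) =====
def Claim_equal_max_items : Prop := ∀ (money : Int) (productPrice : List Int), Dom_max_items money productPrice → Spec_max_items money productPrice (max_items money productPrice)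

-- ===== LEMMAS AND PROOFS =====
-- A's remaining-money loop equals B's cumulative-cost scan, shifted by the total t spent so far.
theorem loopA_eq_count (l : List Int) : ∀ (m c t : Int),
    maxItemsLoopA m c l = c + altCount (m + t) (altPrefix t l) := by
  induction l with
  | nil => intro m c t; simp [maxItemsLoopA, altPrefix, altCount]
  | cons p rest ih =>
    intro m c t
    simp only [maxItemsLoopA, altPrefix, altCount]
    by_cases h : m ≥ p
    · rw [if_pos h, if_pos (by omega : t + p ≤ m + t), ih (m - p) (c + 1) (t + p)]
      have : m - p + (t + p) = m + t := by omega
      rw [this]; ring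
    · rw [if_neg h, if_neg (by omega : ¬ t + p ≤ m + t)]; ring

-- ===== VERDICT (by name: the statement is the Claim_ definition above) =====
theorem max_items_spec : Claim_equal_max_items := by
  intro money productPrice _
  unfold Spec_max_items max_items max_items_alt
  have h := loopA_eq_count (PySem.List.sorted (PySem.Set.ofList productPrice) (fun x => x) false) money 0 0
  simpa using h
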